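-- pv_equiv track=rewrite | github.com/AusefYousof/CSC384 | A1/solution.py | deadlock
-- ===== SOURCE A (Python) =====
-- _LEFT_WALL = 1
--
-- _TOP_WALL = 2
--
-- _RIGHT_WALL = 3
--
-- _BOTTOM_WALL = 4
--
-- def deadlock(box, obstacles, height, width):
--     """
--     Check if box in deadlock (two adjacent corners have obstacles)
--     returns infinity as h value
--
--     @param box: box to check for
--     @param obstacles: set of obstacles on board
--     @rtype: bool -> True if box in deadlock, False if not
--     """
--
--     #corner of board checking
--     if ((box[0] - 1 < 0 and box[1] - 1 < 0)
--         or (box[0] - 1 < 0 and box[1] + 1 >= height)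
--         or (box[0] + 1 >= width and box[1] - 1 < 0)
--         or (box[0] + 1 >= width and box[1] + 1 >= height)):
--         return True
--
--     #obstacle plus side of board checking
--     wall = attached_to_wall(box, height, width)
--     if wall == _LEFT_WALL:
--         if ((box[0], box[1] - 1) in obstacles or (box[0], box[1] + 1) in obstacles):
--             return True
--     elif wall == _TOP_WALL:
--         if ((box[0] - 1, box[1]) in obstacles or (box[0] + 1, box[1]) in obstacles):
--             return True
--     elif wall == _RIGHT_WALL:
--         if ((box[0], box[1] - 1) in obstacles or (box[0], box[1] + 1) in obstacles):
--             return True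
--     elif wall == _BOTTOM_WALL:
--         if ((box[0] - 1, box[1]) in obstacles or (box[0] + 1, box[1]) in obstacles):
--             return True
--
--     possible_deadlocks = [[(box[0] + 1, box[1]), (box[0], box[1] + 1)], #right and down blocked
--                           [(box[0] + 1, box[1]), (box[0], box[1] - 1)], #right and up blocked
--                           [(box[0] - 1, box[1]), (box[0], box[1] - 1)], #left and up blocked
--                           [(box[0] - 1, box[1]), (box[0], box[1] + 1)]] #left and down blocked
--
--     for deadlock_pair in possible_deadlocks:
--         for obst1, obst2 in [deadlock_pair]:
--             if obst1 in obstacles and obst2 in obstacles: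
--                 return True
--
--     return False
--
-- def attached_to_wall(box, height, width):
--     """
--     Check if box is attached to wall
--
--     @param box: box to check for
--     @rtype: int -> True if box attached to wall, False if not
--     """
--     if (box[0] - 1 < 0):
--         return _LEFT_WALL
--     elif (box[0] + 1 >= width):
--         return _RIGHT_WALL
--     elif (box[1] - 1 < 0):
--         return _TOP_WALL
--     elif (box[1] + 1 >= height):
--         return _BOTTOM_WALL
--     else:
--         return 0
-- ===== SOURCE B (Python) =====
-- def deadlock(box, obstacles, height, width):
--     x, y = box
--     left = x - 1 < 0 or (x - 1, y) in obstacles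
--     right = x + 1 >= width or (x + 1, y) in obstacles
--     top = y - 1 < 0 or (x, y - 1) in obstacles
--     bottom = y + 1 >= height or (x, y + 1) in obstacles
--     return (left or right) and (top or bottom)
-- ===== Notes on version B (the rewrite author's own statement) =====
-- stated objective: simpler
-- what changed: Replaced A's corner special-case, attached_to_wall helper and obstacle-pair loop by four per-direction blocked flags (wall-or-obstacle) combined as (left or right) and (top or bottom).
import Mathlib
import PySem

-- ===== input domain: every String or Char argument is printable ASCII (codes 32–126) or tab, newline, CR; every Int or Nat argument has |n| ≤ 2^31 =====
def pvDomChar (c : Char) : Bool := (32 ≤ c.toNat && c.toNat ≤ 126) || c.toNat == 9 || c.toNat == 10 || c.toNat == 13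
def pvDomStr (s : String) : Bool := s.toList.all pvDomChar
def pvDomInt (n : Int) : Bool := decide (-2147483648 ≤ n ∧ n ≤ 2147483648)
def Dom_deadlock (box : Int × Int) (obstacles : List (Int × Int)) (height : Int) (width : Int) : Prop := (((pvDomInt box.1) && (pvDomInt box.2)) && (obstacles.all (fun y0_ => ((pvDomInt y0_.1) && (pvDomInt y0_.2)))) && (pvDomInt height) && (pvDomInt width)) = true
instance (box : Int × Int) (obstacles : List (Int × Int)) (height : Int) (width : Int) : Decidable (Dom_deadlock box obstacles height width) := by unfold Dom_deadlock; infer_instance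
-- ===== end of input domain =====

-- B replaces A's corner special-case, wall helper and obstacle-pair loop by four
-- per-direction blocked flags combined as (left∨right)∧(top∨bottom): simpler, same cost.

-- ===== PORT A =====
def attachedToWall (box : Int × Int) (height : Int) (width : Int) : Int :=
  if decide (box.1 - 1 < 0) then 1
  else if decide (box.1 + 1 ≥ width) then 3
  else if decide (box.2 - 1 < 0) then 2
  else if decide (box.2 + 1 ≥ height) then 4
  else 0

def deadlockPairs (box : Int × Int) : List ((Int × Int) × (Int × Int)) :=
  [((box.1 + 1, box.2), (box.1, box.2 + 1)),
   ((box.1 + 1, box.2), (box.1, box.2 - 1)),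
   ((box.1 - 1, box.2), (box.1, box.2 - 1)),
   ((box.1 - 1, box.2), (box.1, box.2 + 1))]

def deadlock (box : Int × Int) (obstacles : List (Int × Int)) (height : Int) (width : Int) : Bool :=
  if (decide (box.1 - 1 < 0) && decide (box.2 - 1 < 0))
     || (decide (box.1 - 1 < 0) && decide (box.2 + 1 ≥ height))
     || (decide (box.1 + 1 ≥ width) && decide (box.2 - 1 < 0))
     || (decide (box.1 + 1 ≥ width) && decide (box.2 + 1 ≥ height)) then
    true
  else
    let wall := attachedToWall box height width
    if wall = 1 then
      if obstacles.contains (box.1, box.2 - 1) || obstacles.contains (box.1, box.2 + 1) then true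
      else (deadlockPairs box).any (fun p => obstacles.contains p.1 && obstacles.contains p.2)
    else if wall = 2 then
      if obstacles.contains (box.1 - 1, box.2) || obstacles.contains (box.1 + 1, box.2) then true
      else (deadlockPairs box).any (fun p => obstacles.contains p.1 && obstacles.contains p.2)
    else if wall = 3 then
      if obstacles.contains (box.1, box.2 - 1) || obstacles.contains (box.1, box.2 + 1) then true
      else (deadlockPairs box).any (fun p => obstacles.contains p.1 && obstacles.contains p.2)
    else if wall = 4 then
      if obstacles.contains (box.1 - 1, box.2) || obstacles.contains (box.1 + 1, box.2) then true
      else (deadlockPairs box).any (fun p => obstacles.contains p.1 && obstacles.contains p.2)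
    else (deadlockPairs box).any (fun p => obstacles.contains p.1 && obstacles.contains p.2)

-- ===== PORT B =====
def deadlock_alt (box : Int × Int) (obstacles : List (Int × Int)) (height : Int) (width : Int) : Bool :=
  let x := box.1
  let y := box.2
  let left := decide (x - 1 < 0) || obstacles.contains (x - 1, y)
  let right := decide (x + 1 ≥ width) || obstacles.contains (x + 1, y)
  let top := decide (y - 1 < 0) || obstacles.contains (x, y - 1)
  let bottom := decide (y + 1 ≥ height) || obstacles.contains (x, y + 1)
  (left || right) && (top || bottom)

-- ===== PRECONDITION & SPEC =====
def Spec_deadlock (box : Int × Int) (obstacles : List (Int × Int)) (height : Int) (width : Int) (out : Bool) : Prop := out = deadlock_alt box obstacles height width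
instance (box : Int × Int) (obstacles : List (Int × Int)) (height : Int) (width : Int) (out : Bool) : Decidable (Spec_deadlock box obstacles height width out) := by unfold Spec_deadlock; infer_instance

-- ===== CLAIM (what is proved, stated in full; the proofs are below) =====
def Claim_equal_deadlock : Prop := ∀ (box : Int × Int) (obstacles : List (Int × Int)) (height : Int) (width : Int), Dom_deadlock box obstacles height width → Spec_deadlock box obstacles height width (deadlock box obstacles height width)

-- ===== LEMMAS AND PROOFS =====
-- The whole equivalence is a Boolean identity in the 8 atoms (4 wall tests, 4
-- obstacle-membership tests); generalize them and check all 256 valuations.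

-- ===== VERDICT (by name: the statement is the Claim_ definition above) =====
theorem deadlock_spec : Claim_equal_deadlock := by
  intro box obstacles height width _
  obtain ⟨x, y⟩ := box
  show deadlock (x, y) obstacles height width = deadlock_alt (x, y) obstacles height width
  simp only [deadlock, deadlock_alt, attachedToWall, deadlockPairs,
    List.any_cons, List.any_nil]
  generalize decide (x - 1 < 0) = wl
  generalize decide (x + 1 ≥ width) = wr
  generalize decide (y - 1 < 0) = wt
  generalize decide (y + 1 ≥ height) = wb
  generalize obstacles.contains (x - 1, y) = ol
  generalize obstacles.contains (x + 1, y) = og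
  generalize obstacles.contains (x, y - 1) = ot
  generalize obstacles.contains (x, y + 1) = ob
  revert wl wr wt wb ol og ot ob
  decide
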